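-- pv_equiv track=rewrite | github.com/BigDog-rgy/mn_opportunity_index | scripts/final.py | find_biz_website
-- ===== SOURCE A (Python) =====
-- def find_biz_website(biz_list, name, industry, desc, cat):
--     """Find matching company in scraped businesses by name, category, optionally industry/desc."""
--     companies = []
--     # Pick the right bucket ("500+", "100-499") for the city
--     if cat in biz_list:
--         companies = biz_list[cat]
--     # Sometimes categories can be a string instead of a list
--     if not isinstance(companies, list): return None
--
--     # Try to match on name (case-insensitive, loose), fallback to industry
--     for b in companies:
--         if b["name"].lower().strip() == name.lower().strip():
--             return b.get("website")
--     # If not matched, try matching on name substrings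
--     for b in companies:
--         if name.lower().strip() in b["name"].lower().strip():
--             return b.get("website")
--     # Fallback: try matching on industry and desc
--     for b in companies:
--         if (b.get("industry","").lower() == industry.lower()) and (b.get("description","").lower() == desc.lower()):
--             return b.get("website")
--     return None
-- ===== SOURCE B (Python) =====
-- def find_biz_website(biz_list, name, industry, desc, cat):
--     """Single pass over the bucket, tracking first substring / first industry+desc
--     candidates; exact name match returns immediately."""
--     companies = biz_list.get(cat, [])
--     if not isinstance(companies, list):
--         return None
--     key = name.lower().strip()
--     sub_hit = None
--     meta_hit = None
--     for b in companies:
--         bname = b["name"].lower().strip()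
--         if bname == key:
--             return b.get("website")
--         if sub_hit is None and key in bname:
--             sub_hit = b
--         if meta_hit is None and b.get("industry", "").lower() == industry.lower() \
--                 and b.get("description", "").lower() == desc.lower():
--             meta_hit = b
--     hit = sub_hit if sub_hit is not None else meta_hit
--     return hit.get("website") if hit is not None else None
-- ===== Notes on version B (the rewrite author's own statement) =====
-- stated objective: alternative
-- what changed: Replaces A's three sequential scans of the bucket (exact name, then name substring, then industry+description) with a single loop that returns on an exact match and otherwise records the first substring candidate and the first industry/description candidate, choosing among them after the loop.
-- outside the precondition, e.g. on find_biz_website({'c': [{'name': 'x', 'website': 'w'}, {}]}, 'x', '', '', 'c'): A returns 'w', B returns 'w'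
import Mathlib
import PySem

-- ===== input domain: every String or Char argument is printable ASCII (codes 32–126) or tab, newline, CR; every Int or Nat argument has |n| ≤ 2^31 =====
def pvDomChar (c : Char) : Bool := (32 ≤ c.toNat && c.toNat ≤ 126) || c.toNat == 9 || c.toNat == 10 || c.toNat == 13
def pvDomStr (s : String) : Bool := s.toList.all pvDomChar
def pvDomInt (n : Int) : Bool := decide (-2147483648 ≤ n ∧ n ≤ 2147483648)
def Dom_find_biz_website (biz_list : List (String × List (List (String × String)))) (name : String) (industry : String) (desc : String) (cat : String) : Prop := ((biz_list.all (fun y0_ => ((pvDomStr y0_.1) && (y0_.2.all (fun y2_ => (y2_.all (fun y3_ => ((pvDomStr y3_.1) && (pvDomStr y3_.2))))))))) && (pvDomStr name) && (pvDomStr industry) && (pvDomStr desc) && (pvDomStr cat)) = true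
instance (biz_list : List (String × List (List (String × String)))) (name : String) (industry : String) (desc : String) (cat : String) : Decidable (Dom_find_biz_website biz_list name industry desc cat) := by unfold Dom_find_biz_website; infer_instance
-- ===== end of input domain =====

-- B replaces A's three sequential scans of the bucket by a single loop that tracks the first
-- substring candidate and the first industry/description candidate (objective: alternative).
-- Equivalence is about the return value; neither program mutates its arguments.

-- named transcriptions of the match conditions and of b.get("website"), shared verbatim by
-- both Pythons (each writes them inline); a dict {..} is PySem.Dict.mk of its pair list.
-- b["name"]: entries without a "name" key make the Python raise KeyError; such inputs are
-- excluded by Pre_find_biz_website, so the default "" of getD is never the value compared.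
def pExact (name : String) (b : List (String × String)) : Bool :=
  PySem.Str.strip (PySem.Str.lower ((PySem.Dict.mk b).getD "name" "")) ==
    PySem.Str.strip (PySem.Str.lower name)

def pSub (name : String) (b : List (String × String)) : Bool :=
  PySem.Str.isIn (PySem.Str.strip (PySem.Str.lower name))
    (PySem.Str.strip (PySem.Str.lower ((PySem.Dict.mk b).getD "name" "")))

def pMeta (industry : String) (desc : String) (b : List (String × String)) : Bool :=
  (PySem.Str.lower ((PySem.Dict.mk b).getD "industry" "") == PySem.Str.lower industry) &&
    (PySem.Str.lower ((PySem.Dict.mk b).getD "description" "") == PySem.Str.lower desc)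

def web (b : List (String × String)) : Option String := (PySem.Dict.mk b).get? "website"

-- ===== PORT A =====
-- first for-loop: exact (case-insensitive, stripped) name match; some r = 'return r', none = fell through
def aLoop1 (cs : List (List (String × String))) (name : String) : Option (Option String) :=
  match cs with
  | [] => none
  | b :: rest => if pExact name b then some (web b) else aLoop1 rest name

-- second for-loop: substring name match
def aLoop2 (cs : List (List (String × String))) (name : String) : Option (Option String) :=
  match cs with
  | [] => none
  | b :: rest => if pSub name b then some (web b) else aLoop2 rest name

-- third for-loop: industry + description match
def aLoop3 (cs : List (List (String × String))) (industry : String) (desc : String) :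
    Option (Option String) :=
  match cs with
  | [] => none
  | b :: rest => if pMeta industry desc b then some (web b) else aLoop3 rest industry desc

def find_biz_website (biz_list : List (String × List (List (String × String)))) (name : String) (industry : String) (desc : String) (cat : String) : Option String :=
  -- companies = []; if cat in biz_list: companies = biz_list[cat]
  let companies : List (List (String × String)) :=
    if (PySem.Dict.mk biz_list).contains cat then (PySem.Dict.mk biz_list).getD cat [] else []
  -- 'if not isinstance(companies, list): return None' never fires at this type
  match aLoop1 companies name with
  | some r => r
  | none =>
    match aLoop2 companies name with
    | some r => r
    | none =>
      match aLoop3 companies industry desc with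
      | some r => r
      | none => none

-- ===== PORT B =====
-- the single loop of Source B: return on exact match, else record first substring / first meta candidate
def bLoop (cs : List (List (String × String))) (name : String) (industry : String) (desc : String)
    (subHit metaHit : Option (List (String × String))) : Option String :=
  match cs with
  | [] =>
    -- hit = sub_hit if sub_hit is not None else meta_hit; return hit.get("website") if hit else None
    match (match subHit with | some h => some h | none => metaHit) with
    | some h => web h
    | none => none
  | b :: rest =>
    if pExact name b then web b
    else
      let subHit' := if subHit.isNone && pSub name b then some b else subHit
      let metaHit' := if metaHit.isNone && pMeta industry desc b then some b else metaHit
      bLoop rest name industry desc subHit' metaHit'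

def find_biz_website_alt (biz_list : List (String × List (List (String × String)))) (name : String) (industry : String) (desc : String) (cat : String) : Option String :=
  -- companies = biz_list.get(cat, [])
  let companies := (PySem.Dict.mk biz_list).getD cat []
  bLoop companies name industry desc none none

-- ===== PRECONDITION & SPEC =====
-- Pre_ excludes inputs where some entry of the selected bucket lacks a "name" key: there the
-- Python A raises KeyError, except when an earlier exact name match returns first — that
-- preempted corner (see cites) is conservatively excluded too.
def Pre_find_biz_website (biz_list : List (String × List (List (String × String)))) (name : String) (industry : String) (desc : String) (cat : String) : Prop :=
  (((PySem.Dict.mk biz_list).getD cat []).all (fun b => (PySem.Dict.mk b).contains "name")) = true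
instance (biz_list : List (String × List (List (String × String)))) (name : String) (industry : String) (desc : String) (cat : String) : Decidable (Pre_find_biz_website biz_list name industry desc cat) := by unfold Pre_find_biz_website; infer_instance

def pvWitness_find_biz_website : (List (String × List (List (String × String)))) × String × String × String × String :=
  ([("c", [[("name", "Acme"), ("website", "w")]])], "acme", "", "", "c")

def Spec_find_biz_website (biz_list : List (String × List (List (String × String)))) (name : String) (industry : String) (desc : String) (cat : String) (out : Option String) : Prop := out = find_biz_website_alt biz_list name industry desc cat
instance (biz_list : List (String × List (List (String × String)))) (name : String) (industry : String) (desc : String) (cat : String) (out : Option String) : Decidable (Spec_find_biz_website biz_list name industry desc cat out) := by unfold Spec_find_biz_website; infer_instance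

-- ===== CLAIM (what is proved, stated in full; the proofs are below) =====
def Claim_equal_find_biz_website : Prop := ∀ (biz_list : List (String × List (List (String × String)))) (name : String) (industry : String) (desc : String) (cat : String), Dom_find_biz_website biz_list name industry desc cat → Pre_find_biz_website biz_list name industry desc cat → Spec_find_biz_website biz_list name industry desc cat (find_biz_website biz_list name industry desc cat)

-- ===== LEMMAS AND PROOFS =====

-- the common shape both programs compute
def spine (cs : List (List (String × String))) (name industry desc : String)
    (subHit metaHit : Option (List (String × String))) : Option String :=
  match cs.find? (pExact name) with
  | some b => web b
  | none =>
    match subHit with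
    | some h => web h
    | none =>
      match cs.find? (pSub name) with
      | some b => web b
      | none =>
        match metaHit with
        | some h => web h
        | none =>
          match cs.find? (pMeta industry desc) with
          | some b => web b
          | none => none

lemma aLoop1_eq (cs : List (List (String × String))) (name : String) :
    aLoop1 cs name = (cs.find? (pExact name)).map web := by
  induction cs with
  | nil => simp [aLoop1]
  | cons b rest ih => cases h : pExact name b <;> simp [aLoop1, List.find?_cons, h, ih]

lemma aLoop2_eq (cs : List (List (String × String))) (name : String) :
    aLoop2 cs name = (cs.find? (pSub name)).map web := by
  induction cs with
  | nil => simp [aLoop2]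
  | cons b rest ih => cases h : pSub name b <;> simp [aLoop2, List.find?_cons, h, ih]

lemma aLoop3_eq (cs : List (List (String × String))) (industry desc : String) :
    aLoop3 cs industry desc = (cs.find? (pMeta industry desc)).map web := by
  induction cs with
  | nil => simp [aLoop3]
  | cons b rest ih => cases h : pMeta industry desc b <;> simp [aLoop3, List.find?_cons, h, ih]

lemma bLoop_eq (cs : List (List (String × String))) (name industry desc : String)
    (subHit metaHit : Option (List (String × String))) :
    bLoop cs name industry desc subHit metaHit = spine cs name industry desc subHit metaHit := by
  induction cs generalizing subHit metaHit with
  | nil => cases subHit <;> cases metaHit <;> simp [bLoop, spine]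
  | cons b rest ih =>
    cases hE : pExact name b with
    | true => simp [bLoop, spine, List.find?_cons, hE]
    | false =>
      cases subHit with
      | some h =>
        simp [bLoop, spine, List.find?_cons, hE, ih]
      | none =>
        cases metaHit with
        | some m =>
          cases hS : pSub name b <;> simp [bLoop, spine, List.find?_cons, hE, hS, ih]
        | none =>
          cases hS : pSub name b <;> cases hM : pMeta industry desc b <;>
            simp [bLoop, spine, List.find?_cons, hE, hS, hM, ih]

lemma companies_eq (biz_list : List (String × List (List (String × String)))) (cat : String) :
    (if (PySem.Dict.mk biz_list).contains cat then (PySem.Dict.mk biz_list).getD cat [] else []) =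
      (PySem.Dict.mk biz_list).getD cat [] := by
  split_ifs with h
  · rfl
  · have h' : (PySem.Dict.mk biz_list).contains cat = false := by
      cases hb : (PySem.Dict.mk biz_list).contains cat
      · rfl
      · exact absurd hb h
    exact (PySem.Dict.getD_of_not_contains _ _ h').symm

-- ===== VERDICT (by name: the statement is the Claim_ definition above) =====
theorem find_biz_website_spec : Claim_equal_find_biz_website := by
  intro biz_list name industry desc cat _ _
  unfold Spec_find_biz_website find_biz_website find_biz_website_alt
  simp only [companies_eq, aLoop1_eq, aLoop2_eq, aLoop3_eq, bLoop_eq]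
  unfold spine
  cases hE : ((PySem.Dict.mk biz_list).getD cat []).find? (pExact name) <;>
    cases hS : ((PySem.Dict.mk biz_list).getD cat []).find? (pSub name) <;>
      cases hM : ((PySem.Dict.mk biz_list).getD cat []).find? (pMeta industry desc) <;>
        simp [hE, hS, hM]
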